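-- pv_equiv track=rewrite | github.com/DjdogeGamer/SentimentAnalysis | funcoes.py | tratar_texto
-- ===== SOURCE A (Python) =====
-- def tratar_texto(arquivo, lista):
--   for line in arquivo:
--     for i in line:
--       line = line.replace("\n","")
--       line = line.replace(".","")
--       line = line.replace(",","")
--       line = line.lower()
--     line = line.split()
--     lista.append(line)
--   return lista
-- ===== SOURCE B (Python) =====
-- def tratar_texto(arquivo, lista):
--   for line in arquivo:
--     tokens = []
--     for tok in line.replace("\n", "").split():
--       w = tok.replace(".", "").replace(",", "").lower()
--       if w:
--         tokens.append(w)
--     lista.append(tokens)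
--   return lista
-- ===== Notes on version B (the rewrite author's own statement) =====
-- stated objective: faster
-- what changed: A re-cleans the whole line once per character (rebuilding the string inside a per-character loop) and then splits; B splits each line into whitespace tokens first and then strips '.', ',' and lowercases each token exactly once, dropping tokens that become empty.
import Mathlib
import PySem

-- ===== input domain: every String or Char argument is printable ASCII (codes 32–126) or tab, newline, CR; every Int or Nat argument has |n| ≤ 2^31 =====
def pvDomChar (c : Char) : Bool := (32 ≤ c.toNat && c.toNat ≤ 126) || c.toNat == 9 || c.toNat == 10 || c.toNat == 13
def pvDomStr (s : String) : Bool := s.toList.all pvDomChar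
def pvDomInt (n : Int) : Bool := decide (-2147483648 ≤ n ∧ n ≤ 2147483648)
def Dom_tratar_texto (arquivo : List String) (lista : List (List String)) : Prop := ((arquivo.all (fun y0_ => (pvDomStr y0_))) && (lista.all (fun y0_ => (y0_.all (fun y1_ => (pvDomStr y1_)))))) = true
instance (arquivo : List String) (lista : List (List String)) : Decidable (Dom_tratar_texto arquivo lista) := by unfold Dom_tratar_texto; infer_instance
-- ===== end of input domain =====

-- B tokenizes each line first and then cleans each token exactly once, instead of A's
-- per-character re-cleaning of the whole line followed by a split (objective: faster,
-- measured). A mutates `lista` in place and returns it; the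
-- equivalence proved here is about the return value.

-- ===== PORT A =====
-- one pass of A's loop body: line.replace("\n","").replace(".","").replace(",","").lower()
def pvCleanA (l : String) : String :=
  PySem.Str.lower (PySem.Str.replace (PySem.Str.replace (PySem.Str.replace l "\n" "") "." "") "," "")

def tratar_texto (arquivo : List String) (lista : List (List String)) : List (List String) :=
  arquivo.foldl (fun acc line0 =>
    -- for i in line: line = line.replace(...).replace(...).replace(...).lower()
    let line := line0.toList.foldl (fun l _ => pvCleanA l) line0
    acc ++ [PySem.Str.split₀ line]) lista

-- ===== PORT B =====
-- w = tok.replace(".", "").replace(",", "").lower()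
def pvCleanTok (t : String) : String :=
  PySem.Str.lower (PySem.Str.replace (PySem.Str.replace t "." "") "," "")

def tratar_texto_alt (arquivo : List String) (lista : List (List String)) : List (List String) :=
  arquivo.foldl (fun acc line =>
    let tokens := (PySem.Str.split₀ (PySem.Str.replace line "\n" "")).foldl
      (fun toks tok =>
        let w := pvCleanTok tok
        if w ≠ "" then toks ++ [w] else toks) []
    acc ++ [tokens]) lista

-- ===== PRECONDITION & SPEC =====
def Spec_tratar_texto (arquivo : List String) (lista : List (List String)) (out : List (List String)) : Prop := out = tratar_texto_alt arquivo lista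
instance (arquivo : List String) (lista : List (List String)) (out : List (List String)) : Decidable (Spec_tratar_texto arquivo lista out) := by unfold Spec_tratar_texto; infer_instance

-- ===== CLAIM (what is proved, stated in full; the proofs are below) =====
def Claim_equal_tratar_texto : Prop := ∀ (arquivo : List String) (lista : List (List String)), Dom_tratar_texto arquivo lista → Spec_tratar_texto arquivo lista (tratar_texto arquivo lista)

-- ===== LEMMAS AND PROOFS =====

-- removing one character with str.replace is a filter
theorem pv_replace_go_single (c : Char) :
    ∀ (l : List Char) (fuel : Nat) (acc : List Char), l.length ≤ fuel →
      PySem.Chars.replace.go [c] [] fuel l acc = acc.reverse ++ l.filter (fun d => d != c) := by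
  intro l
  induction l with
  | nil =>
    intro fuel acc _
    cases fuel <;> simp [PySem.Chars.replace.go]
  | cons a t ih =>
    intro fuel acc hf
    cases fuel with
    | zero => simp at hf
    | succ fuel =>
      by_cases hac : a = c
      · subst hac
        have hpre : [a].isPrefixOf (a :: t) = true := by simp [List.isPrefixOf]
        simp only [PySem.Chars.replace.go, hpre, if_pos, List.length_cons, List.length_nil,
          List.drop_succ_cons, List.drop_zero, List.reverse_nil, List.nil_append]
        rw [ih fuel acc (by simpa using hf)]
        simp
      · have hpre : [c].isPrefixOf (a :: t) = false := by
          simp [List.isPrefixOf]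
          exact fun h => (hac h.symm).elim
        simp only [PySem.Chars.replace.go, hpre]
        rw [if_neg (by simp)]
        rw [ih fuel (a :: acc) (by simpa using hf)]
        simp [hac]

theorem pv_replace_single (s : List Char) (c : Char) :
    PySem.Chars.replace s [c] [] = s.filter (fun d => d != c) := by
  unfold PySem.Chars.replace
  rw [if_neg (by simp)]
  simpa using pv_replace_go_single c s s.length [] le_rfl

-- reference form of str.split(): words separated by whitespace
def pvWords : List Char → List (List Char)
  | [] => []
  | c :: t =>
    if PySem.Chars.isspace c then pvWords t
    else (c :: t.takeWhile (fun d => !PySem.Chars.isspace d)) ::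
      pvWords (t.dropWhile (fun d => !PySem.Chars.isspace d))
termination_by l => l.length
decreasing_by
  · simp
  · have := List.length_dropWhile_le (fun d => !PySem.Chars.isspace d) t
    simp only [List.length_cons]
    omega

theorem pvWords_nil : pvWords [] = [] := by rw [pvWords]

theorem pvWords_cons (c : Char) (t : List Char) :
    pvWords (c :: t) = if PySem.Chars.isspace c then pvWords t
      else (c :: t.takeWhile (fun d => !PySem.Chars.isspace d)) ::
        pvWords (t.dropWhile (fun d => !PySem.Chars.isspace d)) := by rw [pvWords]

def pvWordsAux (cur l : List Char) : List (List Char) :=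
  if cur.isEmpty then pvWords l
  else (cur.reverse ++ l.takeWhile (fun d => !PySem.Chars.isspace d)) ::
    pvWords (l.dropWhile (fun d => !PySem.Chars.isspace d))

theorem pv_split_go_eq : ∀ (l cur : List Char) (acc : List (List Char)),
    PySem.Chars.split₀.go l cur acc = acc.reverse ++ pvWordsAux cur l := by
  intro l
  induction l with
  | nil =>
    intro cur acc
    by_cases hc : cur.isEmpty
    · simp [PySem.Chars.split₀.go, pvWordsAux, hc, pvWords_nil]
    · simp [PySem.Chars.split₀.go, pvWordsAux, hc, pvWords_nil]
  | cons c t ih =>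
    intro cur acc
    by_cases hs : PySem.Chars.isspace c
    · by_cases hc : cur.isEmpty
      · simp only [PySem.Chars.split₀.go, hs, hc, if_pos, if_true]
        rw [ih [] acc]
        simp [pvWordsAux, hc, pvWords_cons, hs]
      · simp only [PySem.Chars.split₀.go, hs, hc, if_true, if_false, Bool.false_eq_true]
        rw [ih [] (cur.reverse :: acc)]
        simp [pvWordsAux, hc, pvWords_cons, hs]
    · simp only [PySem.Chars.split₀.go, hs, Bool.false_eq_true, if_false]
      rw [ih (c :: cur) acc]
      by_cases hc : cur.isEmpty
      · have hcur : cur = [] := by simpa [List.isEmpty_iff] using hc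
        subst hcur
        simp [pvWordsAux, pvWords_cons, hs]
      · simp [pvWordsAux, hc, pvWords_cons, hs]

theorem pv_split₀_eq_words (s : List Char) : PySem.Chars.split₀ s = pvWords s := by
  show PySem.Chars.split₀.go s [] [] = _
  rw [pv_split_go_eq]
  simp [pvWordsAux]

-- whitespace facts
theorem pv_isspace_false_of_range (c : Char) (h1 : 33 ≤ c.toNat) (h2 : c.toNat ≤ 126) :
    PySem.Chars.isspace c = false := by
  simp only [PySem.Chars.isspace, Bool.or_eq_false_iff, Bool.and_eq_false_iff,
    decide_eq_false_iff_not]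
  omega

theorem pv_isupper_toNat (c : Char) (h : PySem.Chars.isupper c = true) :
    65 ≤ c.toNat ∧ c.toNat ≤ 90 := by
  simp only [PySem.Chars.isupper, Bool.and_eq_true, decide_eq_true_eq] at h
  obtain ⟨h1, h2⟩ := h
  rw [Char.le_def, UInt32.le_iff_toNat_le] at h1 h2
  exact ⟨h1, h2⟩

theorem pv_toNat_lowerChar (c : Char) (h : PySem.Chars.isupper c = true) :
    (PySem.Chars.lowerChar c).toNat = c.toNat + 32 := by
  obtain ⟨_, h2⟩ := pv_isupper_toNat c h
  simp only [PySem.Chars.lowerChar, h, if_pos]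
  unfold Char.ofNat
  rw [dif_pos (Or.inl (by omega))]
  rfl

theorem pv_lowerChar_of_not_upper (c : Char) (h : PySem.Chars.isupper c = false) :
    PySem.Chars.lowerChar c = c := by
  unfold PySem.Chars.lowerChar
  rw [if_neg (by simp [h])]

theorem pv_isspace_lowerChar (c : Char) :
    PySem.Chars.isspace (PySem.Chars.lowerChar c) = PySem.Chars.isspace c := by
  by_cases h : PySem.Chars.isupper c
  · obtain ⟨h1, h2⟩ := pv_isupper_toNat c h
    rw [pv_isspace_false_of_range c (by omega) (by omega)]
    have := pv_toNat_lowerChar c h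
    rw [pv_isspace_false_of_range _ (by omega) (by omega)]
  · rw [pv_lowerChar_of_not_upper c (by simpa using h)]

theorem pv_lowerChar_idem (c : Char) :
    PySem.Chars.lowerChar (PySem.Chars.lowerChar c) = PySem.Chars.lowerChar c := by
  by_cases h : PySem.Chars.isupper c
  · apply pv_lowerChar_of_not_upper
    have := pv_toNat_lowerChar c h
    obtain ⟨h1, h2⟩ := pv_isupper_toNat c h
    by_cases hu : PySem.Chars.isupper (PySem.Chars.lowerChar c)
    · obtain ⟨h3, h4⟩ := pv_isupper_toNat _ hu
      omega
    · simpa using hu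
  · have h' := pv_lowerChar_of_not_upper c (by simpa using h)
    rw [h', h']

-- the cleaning maps, as filterMap
def pvF (c : Char) : Option Char :=
  if c = '\n' ∨ c = '.' ∨ c = ',' then none else some (PySem.Chars.lowerChar c)

def pvG (c : Char) : Option Char :=
  if c = '.' ∨ c = ',' then none else some (PySem.Chars.lowerChar c)

theorem pv_filterMap_F (s : List Char) :
    PySem.Chars.lower (((s.filter (fun d => d != '\n')).filter (fun d => d != '.')).filter
      (fun d => d != ',')) = s.filterMap pvF := by
  simp only [PySem.Chars.lower, ← List.filterMap_eq_map, ← List.filterMap_eq_filter,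
    List.filterMap_filterMap]
  apply List.filterMap_congr
  intro c _
  by_cases h1 : c = '\n'
  · simp [h1, pvF, Option.guard]
  · by_cases h2 : c = '.'
    · simp [h1, h2, pvF, Option.guard]
    · by_cases h3 : c = ','
      · simp [h1, h2, h3, pvF, Option.guard]
      · simp [h1, h2, h3, pvF, Option.guard]

theorem pv_filterMap_G (s : List Char) :
    PySem.Chars.lower ((s.filter (fun d => d != '.')).filter (fun d => d != ',')) =
      s.filterMap pvG := by
  simp only [PySem.Chars.lower, ← List.filterMap_eq_map, ← List.filterMap_eq_filter,
    List.filterMap_filterMap]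
  apply List.filterMap_congr
  intro c _
  by_cases h2 : c = '.'
  · simp [h2, pvG, Option.guard]
  · by_cases h3 : c = ','
    · simp [h2, h3, pvG, Option.guard]
    · simp [h2, h3, pvG, Option.guard]

theorem pv_F_eq_G_after_newline (s : List Char) :
    s.filterMap pvF = (s.filter (fun d => d != '\n')).filterMap pvG := by
  simp only [← List.filterMap_eq_filter, List.filterMap_filterMap]
  apply List.filterMap_congr
  intro c _
  by_cases h1 : c = '\n'
  · simp [h1, pvF, Option.guard]
  · by_cases h2 : c = '.'
    · simp [h1, h2, pvF, pvG, Option.guard]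
    · by_cases h3 : c = ','
      · simp [h1, h2, h3, pvF, pvG, Option.guard]
      · simp [h1, h2, h3, pvF, pvG, Option.guard]

-- F is idempotent (as a filterMap)
theorem pv_F_bind (c : Char) : (pvF c).bind pvF = pvF c := by
  by_cases h : c = '\n' ∨ c = '.' ∨ c = ','
  · simp [pvF, h]
  · push_neg at h
    obtain ⟨h1, h2, h3⟩ := h
    have hlc : PySem.Chars.lowerChar c ≠ '\n' ∧ PySem.Chars.lowerChar c ≠ '.' ∧
        PySem.Chars.lowerChar c ≠ ',' := by
      by_cases hu : PySem.Chars.isupper c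
      · have := pv_toNat_lowerChar c hu
        obtain ⟨ha, hb⟩ := pv_isupper_toNat c hu
        refine ⟨?_, ?_, ?_⟩ <;> (intro he; have := congrArg Char.toNat he; simp at this; omega)
      · rw [pv_lowerChar_of_not_upper c (by simpa using hu)]; exact ⟨h1, h2, h3⟩
    simp [pvF, h1, h2, h3, hlc.1, hlc.2.1, hlc.2.2, pv_lowerChar_idem]

theorem pv_filterMap_F_idem (s : List Char) :
    (s.filterMap pvF).filterMap pvF = s.filterMap pvF := by
  rw [List.filterMap_filterMap]
  exact List.filterMap_congr (fun c _ => pv_F_bind c)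

-- words of an all-nonspace block followed by a space-headed (or empty) rest
theorem pv_words_append (u v : List Char)
    (hu : ∀ x ∈ u, PySem.Chars.isspace x = false)
    (hv : v = [] ∨ ∃ s r, v = s :: r ∧ PySem.Chars.isspace s = true) :
    pvWords (u ++ v) = (if u.isEmpty then [] else [u]) ++ pvWords v := by
  cases u with
  | nil => simp
  | cons a u' =>
    have ha : PySem.Chars.isspace a = false := hu a (by simp)
    have htw : (u' ++ v).takeWhile (fun d => !PySem.Chars.isspace d) = u' := by
      have h1 : u'.takeWhile (fun d => !PySem.Chars.isspace d) = u' :=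
        List.takeWhile_eq_self_iff.mpr (fun x hx => by simp [hu x (by simp [hx])])
      have h2 : List.takeWhile (fun d => !PySem.Chars.isspace d) v = [] := by
        rcases hv with rfl | ⟨s, r, rfl, hs⟩
        · rfl
        · rw [List.takeWhile_cons]; simp [hs]
      rw [List.takeWhile_append, h1, if_pos rfl, h2, List.append_nil]
    have hdw : (u' ++ v).dropWhile (fun d => !PySem.Chars.isspace d) = v := by
      have := List.takeWhile_append_dropWhile (p := fun d => !PySem.Chars.isspace d)
        (l := u' ++ v)
      rw [htw] at this
      exact (List.append_cancel_left this)
    show pvWords (a :: (u' ++ v)) = _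
    rw [pvWords_cons]
    simp [ha, htw, hdw]

-- main commutation: cleaning with a space-preserving partial map commutes with split()
theorem pv_words_filterMap (f : Char → Option Char)
    (hn : ∀ c, f c = none → PySem.Chars.isspace c = false)
    (hs : ∀ c d, f c = some d → PySem.Chars.isspace d = PySem.Chars.isspace c) :
    ∀ cs, pvWords (cs.filterMap f) =
      ((pvWords cs).map (List.filterMap f)).filter (fun w => !w.isEmpty) := by
  intro cs
  induction cs using pvWords.induct with
  | case1 => simp [pvWords_nil]
  | case2 c t hsp ih =>
    -- c is whitespace
    obtain ⟨d, hd⟩ : ∃ d, f c = some d := by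
      cases h : f c with
      | none => exact absurd (hn c h) (by simp [hsp])
      | some d => exact ⟨d, rfl⟩
    have hds : PySem.Chars.isspace d = true := by rw [hs c d hd]; exact hsp
    rw [List.filterMap_cons_some hd]
    rw [pvWords_cons, if_pos hds]
    rw [ih]
    conv_rhs => rw [pvWords_cons, if_pos hsp]
  | case3 c t hsp ih =>
    -- c is not whitespace; the word is c :: takeWhile …
    have hsp' : PySem.Chars.isspace c = false := by simpa using hsp
    set w := c :: t.takeWhile (fun d => !PySem.Chars.isspace d) with hw
    set r := t.dropWhile (fun d => !PySem.Chars.isspace d) with hr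
    have hsplit : c :: t = w ++ r := by
      rw [hw, hr]; simp [List.takeWhile_append_dropWhile]
    have hwns : ∀ x ∈ w, PySem.Chars.isspace x = false := by
      intro x hx
      rcases List.mem_cons.mp hx with rfl | hx'
      · exact hsp'
      · simpa using List.mem_takeWhile_imp hx'
    have hrshape : r = [] ∨ ∃ s rr, r = s :: rr ∧ PySem.Chars.isspace s = true := by
      cases hrr : r with
      | nil => exact Or.inl rfl
      | cons s rr =>
        refine Or.inr ⟨s, rr, rfl, ?_⟩
        have : s = r.head (by simp [hrr]) := by simp [hrr]
        rw [this]
        have := List.head_dropWhile_not (fun d => !PySem.Chars.isspace d)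
          (l := t) (by rw [← hr]; simp [hrr])
        simpa using this
    -- image of w is all nonspace, image of r is empty or space-headed
    have hwns' : ∀ x ∈ w.filterMap f, PySem.Chars.isspace x = false := by
      intro x hx
      obtain ⟨y, hy, hfy⟩ := List.mem_filterMap.mp hx
      rw [hs y x hfy]; exact hwns y hy
    have hrshape' : r.filterMap f = [] ∨ ∃ s rr, r.filterMap f = s :: rr ∧
        PySem.Chars.isspace s = true := by
      rcases hrshape with h | ⟨s, rr, hrr, hss⟩
      · exact Or.inl (by simp [h])
      · obtain ⟨d, hd⟩ : ∃ d, f s = some d := by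
          cases h : f s with
          | none => exact absurd (hn s h) (by simp [hss])
          | some d => exact ⟨d, rfl⟩
        refine Or.inr ⟨d, rr.filterMap f, ?_, by rw [hs s d hd]; exact hss⟩
        rw [hrr, List.filterMap_cons_some hd]
    conv_lhs => rw [hsplit]
    rw [List.filterMap_append]
    rw [pv_words_append _ _ hwns' hrshape', ih]
    conv_rhs => rw [pvWords_cons]; rw [if_neg (by simp [hsp'])]
    rw [← hw, ← hr, List.map_cons, List.filter_cons]
    by_cases he : (w.filterMap f).isEmpty <;> simp [he]

theorem pv_G_none (c : Char) (h : pvG c = none) : PySem.Chars.isspace c = false := by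
  simp only [pvG] at h
  split at h
  · rename_i hc
    rcases hc with rfl | rfl <;> decide
  · simp at h

theorem pv_G_some (c d : Char) (h : pvG c = some d) :
    PySem.Chars.isspace d = PySem.Chars.isspace c := by
  simp only [pvG] at h
  split at h
  · simp at h
  · cases h; exact pv_isspace_lowerChar c

-- string-level clean lemmas
theorem pv_cleanA_toList (l : String) : (pvCleanA l).toList = l.toList.filterMap pvF := by
  simp only [pvCleanA, PySem.Str.toList_lower, PySem.Str.toList_replace]
  have h1 : ("\n" : String).toList = ['\n'] := rfl
  have h2 : ("." : String).toList = ['.'] := rfl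
  have h3 : ("," : String).toList = [','] := rfl
  have h4 : ("" : String).toList = [] := rfl
  rw [h1, h2, h3, h4, pv_replace_single, pv_replace_single, pv_replace_single]
  exact pv_filterMap_F l.toList

theorem pv_cleanTok_toList (t : String) : (pvCleanTok t).toList = t.toList.filterMap pvG := by
  simp only [pvCleanTok, PySem.Str.toList_lower, PySem.Str.toList_replace]
  have h2 : ("." : String).toList = ['.'] := rfl
  have h3 : ("," : String).toList = [','] := rfl
  have h4 : ("" : String).toList = [] := rfl
  rw [h2, h3, h4, pv_replace_single, pv_replace_single]
  exact pv_filterMap_G t.toList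

theorem pv_cleanA_idem (l : String) : pvCleanA (pvCleanA l) = pvCleanA l := by
  apply String.toList_inj.mp
  rw [pv_cleanA_toList, pv_cleanA_toList]
  exact pv_filterMap_F_idem l.toList

theorem pv_fold_idem {α : Type} (g : String → String) (hg : ∀ x, g (g x) = g x)
    (l : List α) (s : String) : l.foldl (fun a _ => g a) (g s) = g s := by
  induction l generalizing s with
  | nil => rfl
  | cons a t ih => simp only [List.foldl_cons]; rw [hg]; exact ih s

theorem pv_pred_eq (tok : String) :
    decide (pvCleanTok tok ≠ "") = !(tok.toList.filterMap pvG).isEmpty := by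
  rw [← pv_cleanTok_toList]
  by_cases h : pvCleanTok tok = ""
  · simp [h]
  · have h2 : (pvCleanTok tok).toList ≠ [] := by rwa [ne_eq, String.toList_eq_nil_iff]
    simp [h, List.isEmpty_eq_false_iff, h2]

theorem pv_filter_map_comm (L : List String) (g : List Char → List Char) :
    ((L.map String.toList).map g).filter (fun w => !w.isEmpty) =
      (L.filter (fun t => !(g t.toList).isEmpty)).map (fun t => g t.toList) := by
  induction L with
  | nil => simp
  | cons a tl ih =>
    simp only [List.map_cons, List.filter_cons]
    by_cases h : (g a.toList).isEmpty
    · rw [if_neg (by simp [h]), if_neg (by simp [h])]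
      exact ih
    · rw [if_pos (by simp [h]), if_pos (by simp [h])]
      simp only [List.map_cons]
      rw [ih]

theorem pv_strings_eq_of_toList (L M : List String)
    (h : L.map String.toList = M.map String.toList) : L = M :=
  List.map_injective_iff.mpr (fun _ _ hab => String.toList_inj.mp hab) h

-- the per-line results agree
theorem pv_line_eq (line : String) :
    PySem.Str.split₀ (line.toList.foldl (fun l _ => pvCleanA l) line) =
      (PySem.Str.split₀ (PySem.Str.replace line "\n" "")).foldl
        (fun toks tok => if pvCleanTok tok ≠ "" then toks ++ [pvCleanTok tok] else toks) [] := by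
  -- B side: turn the foldl into filter+map
  have hb : (PySem.Str.split₀ (PySem.Str.replace line "\n" "")).foldl
      (fun toks tok => if pvCleanTok tok ≠ "" then toks ++ [pvCleanTok tok] else toks) [] =
      ((PySem.Str.split₀ (PySem.Str.replace line "\n" "")).filter
        (fun tok => decide (pvCleanTok tok ≠ ""))).map pvCleanTok := by
    have := PySem.List.foldl_append_if (fun tok => decide (pvCleanTok tok ≠ ""))
      pvCleanTok (PySem.Str.split₀ (PySem.Str.replace line "\n" "")) []
    simp only [List.nil_append] at this
    rw [← this]
    have hfun : (fun (toks : List String) tok =>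
        if pvCleanTok tok ≠ "" then toks ++ [pvCleanTok tok] else toks) =
        (fun toks tok => if (decide (pvCleanTok tok ≠ "")) = true
          then toks ++ [pvCleanTok tok] else toks) := by
      funext toks tok
      by_cases h : pvCleanTok tok ≠ "" <;> simp [h]
    rw [hfun]
  rw [hb]
  -- both sides via their toList images
  apply pv_strings_eq_of_toList
  have hS : (PySem.Str.replace line "\n" "").toList =
      line.toList.filter (fun d => d != '\n') := by
    rw [PySem.Str.toList_replace]
    have h1 : ("\n" : String).toList = ['\n'] := rfl
    have h4 : ("" : String).toList = [] := rfl
    rw [h1, h4, pv_replace_single]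
  have hL : (PySem.Str.split₀ (PySem.Str.replace line "\n" "")).map String.toList =
      pvWords (line.toList.filter (fun d => d != '\n')) := by
    rw [PySem.Str.split₀_map_toList, hS, pv_split₀_eq_words]
  -- right-hand side
  have hrhs : (((PySem.Str.split₀ (PySem.Str.replace line "\n" "")).filter
      (fun tok => decide (pvCleanTok tok ≠ ""))).map pvCleanTok).map String.toList =
      (pvWords ((line.toList.filter (fun d => d != '\n')).filterMap pvG)) := by
    rw [pv_words_filterMap pvG pv_G_none pv_G_some, ← hL]
    rw [pv_filter_map_comm, List.map_map]
    have hpred : (fun tok => decide (pvCleanTok tok ≠ "")) =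
        (fun t : String => !(List.filterMap pvG t.toList).isEmpty) :=
      funext fun tok => pv_pred_eq tok
    rw [hpred]
    apply List.map_congr_left
    intro t _
    simp [Function.comp, pv_cleanTok_toList]
  rw [hrhs]
  -- left-hand side: the char loop does nothing on an empty line, else cleans once
  cases hcs : line.toList with
  | nil =>
    simp only [List.foldl_nil]
    rw [PySem.Str.split₀_map_toList, hcs, pv_split₀_eq_words]
    simp [pvWords_nil]
  | cons c t =>
    have hfold : List.foldl (fun l _ => pvCleanA l) line (c :: t) = pvCleanA line := by
      simp only [List.foldl_cons]
      exact pv_fold_idem pvCleanA pv_cleanA_idem t line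
    rw [hfold, PySem.Str.split₀_map_toList, pv_cleanA_toList, pv_split₀_eq_words]
    rw [pv_F_eq_G_after_newline, hcs]

theorem pv_main (arquivo : List String) (lista : List (List String)) :
    tratar_texto arquivo lista = tratar_texto_alt arquivo lista := by
  unfold tratar_texto tratar_texto_alt
  induction arquivo generalizing lista with
  | nil => rfl
  | cons line rest ih =>
    simp only [List.foldl_cons]
    rw [pv_line_eq line]
    exact ih _

-- ===== VERDICT (by name: the statement is the Claim_ definition above) =====
theorem tratar_texto_spec : Claim_equal_tratar_texto := by
  intro arquivo lista _
  unfold Spec_tratar_texto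
  exact pv_main arquivo lista
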